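-- pv_equiv track=rewrite | github.com/b-hub/cracker | predictor.py | getPattern
-- ===== SOURCE A (Python) =====
-- def getPattern(word):
-- 	usedLetters = {}
-- 	pat= ""
-- 	i = 0
-- 	for letter in word:
-- 		try:
-- 			pat += usedLetters[letter]
-- 		except KeyError:
-- 			abstractLetter = chr(97 + i)
-- 			usedLetters[letter] = abstractLetter
-- 			pat += abstractLetter
-- 			i += 1
-- 	return pat
-- ===== SOURCE B (Python) =====
-- def getPattern(word):
--     # No mapping table: the abstract letter of c is determined directly by
--     # the number of distinct characters occurring before c's first occurrence.
--     return "".join(chr(97 + len(set(word[:word.index(c)]))) for c in word)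
-- ===== Notes on version B (the rewrite author's own statement) =====
-- stated objective: alternative
-- what changed: Drops A's incrementally-built letter->abstract-letter dict and counter entirely: each output character is computed independently, rank(c) = number of distinct characters in the prefix before c's first occurrence (via word.index and set of a slice), trading A's single stateful pass for a stateless per-character closed form.
import Mathlib
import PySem

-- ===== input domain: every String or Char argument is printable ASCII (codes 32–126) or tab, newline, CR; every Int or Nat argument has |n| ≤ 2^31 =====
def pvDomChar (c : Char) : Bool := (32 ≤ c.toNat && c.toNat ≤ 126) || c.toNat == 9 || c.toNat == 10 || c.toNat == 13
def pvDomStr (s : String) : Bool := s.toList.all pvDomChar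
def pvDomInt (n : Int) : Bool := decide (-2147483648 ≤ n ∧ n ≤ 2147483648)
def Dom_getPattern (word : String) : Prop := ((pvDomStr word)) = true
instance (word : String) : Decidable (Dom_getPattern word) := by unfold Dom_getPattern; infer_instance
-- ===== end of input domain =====

-- B drops A's stateful dict+counter loop: each output letter is computed independently as
-- chr(97 + number of distinct characters before the character's first occurrence).

-- chr(97 + i); the argument is always ≥ 0 in both programs
def pvChr (i : Nat) : Char := Char.ofNat (97 + i)

-- ===== PORT A =====
-- A's for-loop: state = (usedLetters as insertion-ordered assoc list, pat as List Char, counter i).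
-- dict lookup = first match in the assoc list; 'pat += s' for the 1-char string s is pat ++ [a].
def pvGoA : List Char → List (Char × Char) → List Char → Nat → List Char
  | [], _, pat, _ => pat
  | c :: cs, d, pat, i =>
    match d.lookup c with
    | some a => pvGoA cs d (pat ++ [a]) i
    | none   => pvGoA cs (d ++ [(c, pvChr i)]) (pat ++ [pvChr i]) (i + 1)

def getPattern (word : String) : String := String.mk (pvGoA word.toList [] [] 0)

-- ===== PORT B =====
-- ''.join(chr(97 + len(set(word[:word.index(c)]))) for c in word)
-- word.index(c) never raises here (c is drawn from word), so the .getD 0 default never fires;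
-- word[:k] with k = that nonnegative index is .take k; set(...) is PySem.Set.ofList; len is .length.
def getPattern_alt (word : String) : String :=
  String.mk (word.toList.map (fun c =>
    pvChr (PySem.Set.ofList (word.toList.take ((PySem.List.index? word.toList c).getD 0))).length))

-- ===== PRECONDITION & SPEC =====
def Spec_getPattern (word : String) (out : String) : Prop := out = getPattern_alt word
instance (word : String) (out : String) : Decidable (Spec_getPattern word out) := by unfold Spec_getPattern; infer_instance

-- ===== CLAIM (what is proved, stated in full; the proofs are below) =====
def Claim_equal_getPattern : Prop := ∀ (word : String), Dom_getPattern word → Spec_getPattern word (getPattern word)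

-- ===== LEMMAS AND PROOFS =====

-- B's per-character value, as a function of the whole word
def pvSpecL (w : List Char) (c : Char) : Char :=
  pvChr (PySem.Set.ofList (w.take ((PySem.List.index? w c).getD 0))).length

theorem lookup_append_some {c : Char} {l₁ l₂ : List (Char × Char)} {a : Char}
    (h : l₁.lookup c = some a) : (l₁ ++ l₂).lookup c = some a := by
  induction l₁ with
  | nil => simp [List.lookup] at h
  | cons p ps ih =>
    simp only [List.cons_append, List.lookup] at h ⊢
    cases hc : (c == p.1) <;> simp only [hc] at h ⊢
    · exact ih h
    · exact h

theorem lookup_append_none {c : Char} {l₁ l₂ : List (Char × Char)}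
    (h : l₁.lookup c = none) : (l₁ ++ l₂).lookup c = l₂.lookup c := by
  induction l₁ with
  | nil => simp
  | cons p ps ih =>
    simp only [List.cons_append, List.lookup] at h ⊢
    cases hc : (c == p.1) <;> simp only [hc] at h ⊢
    · exact ih h
    · exact absurd h (by simp)

-- the new character's abstract letter: B's closed form gives exactly A's counter value
theorem pvSpecL_new {p cs : List Char} {c : Char} (hm : c ∉ p) :
    pvSpecL (p ++ c :: cs) c = pvChr (PySem.Set.ofList p).length := by
  have h1 : PySem.List.index? (p ++ c :: cs) c = some p.length := by
    have : p ++ c :: cs = (p ++ [c]) ++ cs := by simp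
    rw [this, PySem.List.index?_append_of_mem _ (by simp),
        PySem.List.index?_append_singleton_self p c hm]
  have h2 : (p ++ c :: cs).take p.length = p := by
    simpa using List.take_left p (c :: cs)
  rw [PySem.List.index?_eq_idxOf?] at h1
  simp [pvSpecL, h1, h2]

-- A's loop invariant: the dict holds exactly B's closed-form letters of the processed prefix,
-- and the counter is the number of distinct letters seen so far.
theorem pvMain (w : List Char) : ∀ (rest p pat : List Char) (d : List (Char × Char)),
    p ++ rest = w →
    (∀ c, d.lookup c = if c ∈ p then some (pvSpecL w c) else none) →
    pvGoA rest d pat (PySem.Set.ofList p).length = pat ++ rest.map (pvSpecL w) := by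
  intro rest
  induction rest with
  | nil => intro p pat d _ _; simp [pvGoA]
  | cons c cs ih =>
    intro p pat d hw hd
    by_cases hm : c ∈ p
    · have hc : d.lookup c = some (pvSpecL w c) := by rw [hd c, if_pos hm]
      have hlen : PySem.Set.ofList (p ++ [c]) = PySem.Set.ofList p := by
        rw [PySem.Set.ofList_append_singleton,
            PySem.Set.add_of_mem (by rw [PySem.Set.mem_ofList]; exact hm)]
      have hd' : ∀ c', (d.lookup c') = if c' ∈ p ++ [c] then some (pvSpecL w c') else none := by
        intro c'
        rw [hd c']
        by_cases h' : c' ∈ p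
        · rw [if_pos h', if_pos (by simp [h'])]
        · rw [if_neg h', if_neg (by simp [h']; rintro rfl; exact h' hm)]
      have := ih (p ++ [c]) (pat ++ [pvSpecL w c]) d (by simpa using hw) hd'
      rw [hlen] at this
      simp only [pvGoA, hc, this, List.map_cons, List.append_assoc, List.singleton_append]
    · have hc : d.lookup c = none := by rw [hd c, if_neg hm]
      have hval : pvChr (PySem.Set.ofList p).length = pvSpecL w c := by
        rw [← hw]; exact (pvSpecL_new hm).symm
      have hlen : (PySem.Set.ofList (p ++ [c])).length = (PySem.Set.ofList p).length + 1 := by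
        rw [PySem.Set.ofList_append_singleton,
            PySem.Set.add_of_not_mem (by rw [PySem.Set.mem_ofList]; exact hm)]
        simp
      have hd' : ∀ c', ((d ++ [(c, pvChr (PySem.Set.ofList p).length)]).lookup c')
          = if c' ∈ p ++ [c] then some (pvSpecL w c') else none := by
        intro c'
        by_cases h' : c' ∈ p
        · rw [lookup_append_some (by rw [hd c', if_pos h']), if_pos (by simp [h'])]
        · rw [lookup_append_none (by rw [hd c', if_neg h'])]
          by_cases hcc : c' = c
          · subst hcc
            simp only [List.lookup, BEq.rfl, if_pos (by simp : c' ∈ p ++ [c'])]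
            rw [hval]
          · have : (c' == c) = false := by simp [hcc]
            simp [List.lookup, this, h', hcc]
      have := ih (p ++ [c]) (pat ++ [pvChr (PySem.Set.ofList p).length]) _ (by simpa using hw) hd'
      rw [hlen] at this
      simp only [pvGoA, hc, this, List.map_cons, ← hval, List.append_assoc, List.singleton_append]

-- ===== VERDICT (by name: the statement is the Claim_ definition above) =====
theorem getPattern_spec : Claim_equal_getPattern := by
  intro word _
  unfold Spec_getPattern getPattern getPattern_alt
  have h := pvMain word.toList word.toList [] [] [] rfl (by intro c; simp [List.lookup])
  rw [show (PySem.Set.ofList ([] : List Char)).length = 0 from rfl] at h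
  rw [h, List.nil_append]
  rfl
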